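-- pv_equiv track=rewrite | github.com/981377660LMT/algorithm-study | 17_模式匹配/最小表示法/最小表示法.py | findIsomorphic
-- ===== SOURCE A (Python) =====
-- def findIsomorphic(seq, isMin=True):
--     """返回字符串最小表示法/最大表示法"""
--     if len(seq) <= 1:
--         return seq
--
--     def compare(s1, s2) -> int:
--         if s1 == s2:
--             return 0
--         if isMin:
--             return 1 if s1 > s2 else -1
--         else:
--             return 1 if s1 < s2 else -1
--
--     n = len(seq)
--     i1, i2, same = 0, 1, 0
--
--     while i1 < n and i2 < n and same < n:
--         diff = compare(seq[(i1 + same) % n], seq[(i2 + same) % n])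
--
--         if diff == 0:
--             same += 1
--             continue
--         elif diff > 0:
--             i1 += same + 1
--         else:
--             i2 += same + 1
--
--         if i1 == i2:
--             i2 += 1
--
--         same = 0
--
--     res = min(i1, i2)
--     return seq[res:] + seq[:res]
-- ===== SOURCE B (Python) =====
-- def findIsomorphic(seq, isMin=True):
--     """返回字符串最小表示法/最大表示法"""
--     if len(seq) <= 1:
--         return seq
--     rotations = (seq[i:] + seq[:i] for i in range(len(seq)))
--     return min(rotations) if isMin else max(rotations)
-- ===== Notes on version B (the rewrite author's own statement) =====
-- stated objective: simpler
-- what changed: Replaced the two-pointer skip scan over cyclic indices by enumerating the n rotations and taking min/max under Python's lexicographic list comparison; tied rotations are identical lists, so the result is the same.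
import Mathlib
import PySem

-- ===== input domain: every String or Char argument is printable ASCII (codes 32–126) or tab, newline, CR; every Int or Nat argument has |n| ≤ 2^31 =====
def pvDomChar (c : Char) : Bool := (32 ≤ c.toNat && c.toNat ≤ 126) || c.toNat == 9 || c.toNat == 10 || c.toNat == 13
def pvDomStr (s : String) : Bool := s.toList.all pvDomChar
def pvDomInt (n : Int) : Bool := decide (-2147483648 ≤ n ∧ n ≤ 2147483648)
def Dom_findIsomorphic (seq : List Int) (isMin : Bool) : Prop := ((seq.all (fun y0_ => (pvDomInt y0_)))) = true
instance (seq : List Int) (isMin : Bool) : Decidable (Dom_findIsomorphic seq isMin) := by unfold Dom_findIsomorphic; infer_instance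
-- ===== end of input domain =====

-- B replaces A's two-pointer skip scan with "build all n rotations, take min/max"
-- (simpler, not faster); the equivalence below is exact on every input.

-- ===== PORT A =====
-- A's nested compare(s1, s2)
def pvCompare (isMin : Bool) (s1 s2 : Int) : Int :=
  if s1 = s2 then 0
  else if isMin then (if s1 > s2 then 1 else -1)
  else (if s1 < s2 then 1 else -1)

-- A's while-loop, fueled (3*n+1 steps always suffice: i1+i2+same grows each
-- iteration and the guard bounds it by 3*n; proved in pvLoop_inv below).
-- Indices (i+same) % n are in [0,n), so pyGetD is exactly seq[(i+same) % n].
def pvLoop (seq : List Int) (isMin : Bool) (n : Nat) :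
    Nat → Nat → Nat → Nat → Nat × Nat
  | 0, i1, i2, _ => (i1, i2)
  | fuel+1, i1, i2, same =>
    if i1 < n ∧ i2 < n ∧ same < n then
      let diff := pvCompare isMin (PySem.List.pyGetD seq (((i1 + same) % n : Nat) : Int) 0)
                                  (PySem.List.pyGetD seq (((i2 + same) % n : Nat) : Int) 0)
      if diff = 0 then pvLoop seq isMin n fuel i1 i2 (same + 1)
      else
        let p : Nat × Nat := if diff > 0 then (i1 + same + 1, i2) else (i1, i2 + same + 1)
        let q : Nat × Nat := if p.1 = p.2 then (p.1, p.2 + 1) else p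
        pvLoop seq isMin n fuel q.1 q.2 0
    else (i1, i2)

def findIsomorphic (seq : List Int) (isMin : Bool) : List Int :=
  if seq.length ≤ 1 then seq
  else
    let n := seq.length
    let r := pvLoop seq isMin n (3 * n + 1) 0 1 0
    let res := min r.1 r.2
    PySem.List.slice seq (some (res : Int)) none ++ PySem.List.slice seq none (some (res : Int))

-- ===== PORT B =====
def findIsomorphic_alt (seq : List Int) (isMin : Bool) : List Int :=
  if seq.length ≤ 1 then seq
  else
    let rotations := (PySem.List.pyRange 0 (PySem.List.len seq) 1).map
      (fun i => PySem.List.slice seq (some i) none ++ PySem.List.slice seq none (some i))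
    if isMin then (PySem.List.min? rotations (fun r => r)).getD []
    else (PySem.List.max? rotations (fun r => r)).getD []

-- ===== PRECONDITION & SPEC =====
def Spec_findIsomorphic (seq : List Int) (isMin : Bool) (out : List Int) : Prop := out = findIsomorphic_alt seq isMin
instance (seq : List Int) (isMin : Bool) (out : List Int) : Decidable (Spec_findIsomorphic seq isMin out) := by unfold Spec_findIsomorphic; infer_instance

-- ===== CLAIM (what is proved, stated in full; the proofs are below) =====
def Claim_equal_findIsomorphic : Prop := ∀ (seq : List Int) (isMin : Bool), Dom_findIsomorphic seq isMin → Spec_findIsomorphic seq isMin (findIsomorphic seq isMin)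

-- ===== LEMMAS AND PROOFS =====

-- the rotation of seq starting at index i
def rotN (seq : List Int) (i : Nat) : List Int := seq.drop i ++ seq.take i

-- seq read cyclically
def fI (seq : List Int) (k : Nat) : Int := seq.getD (k % seq.length) 0

-- the element order the scan uses: < for the minimal, > for the maximal representation
def LTi (isMin : Bool) (a b : Int) : Prop := if isMin then a < b else b < a

-- strict "rotation i is better than rotation j" (first cyclic difference decides)
def rLt (seq : List Int) (isMin : Bool) (i j : Nat) : Prop :=
  ∃ k, k < seq.length ∧ (∀ m, m < k → fI seq (i + m) = fI seq (j + m)) ∧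
    LTi isMin (fI seq (i + k)) (fI seq (j + k))

-- rotations i and j agree everywhere
def rEq (seq : List Int) (i j : Nat) : Prop := ∀ k, k < seq.length → fI seq (i + k) = fI seq (j + k)

def rLe (seq : List Int) (isMin : Bool) (i j : Nat) : Prop := rLt seq isMin i j ∨ rEq seq i j

-- j is an optimal rotation start
def Best (seq : List Int) (isMin : Bool) (j : Nat) : Prop :=
  j < seq.length ∧ ∀ k, k < seq.length → rLe seq isMin j k

-- loop invariant: pointers distinct, one in range, matched prefix of length
-- `same`, and the least optimal start m is still a pointer or ahead of both
def InvA (seq : List Int) (isMin : Bool) (m i1 i2 same : Nat) : Prop :=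
  i1 ≠ i2 ∧ (i1 < seq.length ∨ i2 < seq.length) ∧
  (∀ k, k < same → fI seq (i1 + k) = fI seq (i2 + k)) ∧
  (m = i1 ∨ m = i2 ∨ max i1 i2 < m)

theorem LTi_irrefl (isMin : Bool) (a : Int) : ¬ LTi isMin a a := by
  cases isMin <;> simp [LTi]

theorem LTi_asymm (isMin : Bool) (a b : Int) : LTi isMin a b → LTi isMin b a → False := by
  cases isMin <;> simp [LTi] <;> omega

theorem LTi_total (isMin : Bool) (a b : Int) (h : a ≠ b) : LTi isMin a b ∨ LTi isMin b a := by
  cases isMin <;> simp [LTi] <;> omega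

theorem LTi_trans (isMin : Bool) (a b c : Int) : LTi isMin a b → LTi isMin b c → LTi isMin a c := by
  cases isMin <;> simp [LTi] <;> omega

theorem fI_congr (seq : List Int) (i j : Nat) (h : i % seq.length = j % seq.length) :
    fI seq i = fI seq j := by simp [fI, h]

theorem fI_mod_add (seq : List Int) (j m : Nat) :
    fI seq (j % seq.length + m) = fI seq (j + m) :=
  fI_congr seq _ _ ((Nat.mod_modEq j seq.length).add_right m)

theorem rLt_mod_right (seq : List Int) (isMin : Bool) (i j : Nat) :
    rLt seq isMin i (j % seq.length) ↔ rLt seq isMin i j := by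
  unfold rLt; simp only [fI_mod_add]

theorem rEq_mod_right (seq : List Int) (i j : Nat) :
    rEq seq i (j % seq.length) ↔ rEq seq i j := by
  unfold rEq; simp only [fI_mod_add]

theorem rLe_mod_right (seq : List Int) (isMin : Bool) (i j : Nat) :
    rLe seq isMin i (j % seq.length) ↔ rLe seq isMin i j := by
  unfold rLe; rw [rLt_mod_right, rEq_mod_right]

theorem rEq_refl (seq : List Int) (i : Nat) : rEq seq i i := fun _ _ => rfl

theorem rLe_refl (seq : List Int) (isMin : Bool) (i : Nat) : rLe seq isMin i i :=
  Or.inr (rEq_refl seq i)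

theorem rLe_rLt_absurd (seq : List Int) (isMin : Bool) (i j : Nat) :
    rLe seq isMin i j → rLt seq isMin j i → False := by
  rintro (⟨k1, hk1, hp1, hl1⟩ | heq) ⟨k2, hk2, hp2, hl2⟩
  · rcases lt_trichotomy k1 k2 with h | h | h
    · rw [hp2 k1 h] at hl1; exact LTi_irrefl isMin _ hl1
    · subst h; exact LTi_asymm isMin _ _ hl1 hl2
    · rw [hp1 k2 h] at hl2; exact LTi_irrefl isMin _ hl2
  · rw [heq k2 hk2] at hl2; exact LTi_irrefl isMin _ hl2

theorem rLt_rEq_trans (seq : List Int) (isMin : Bool) (i j l : Nat) :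
    rLt seq isMin i j → rEq seq j l → rLt seq isMin i l := by
  rintro ⟨k, hk, hp, hl⟩ heq
  exact ⟨k, hk, fun m hm => by rw [hp m hm, heq m (hm.trans hk)],
    by rw [← heq k hk]; exact hl⟩

theorem rEq_rLt_trans (seq : List Int) (isMin : Bool) (i j l : Nat) :
    rEq seq i j → rLt seq isMin j l → rLt seq isMin i l := by
  rintro heq ⟨k, hk, hp, hl⟩
  exact ⟨k, hk, fun m hm => by rw [heq m (hm.trans hk), hp m hm],
    by rw [heq k hk]; exact hl⟩

theorem rEq_trans (seq : List Int) (i j l : Nat) :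
    rEq seq i j → rEq seq j l → rEq seq i l := by
  intro h1 h2 k hk; rw [h1 k hk, h2 k hk]

theorem rEq_symm (seq : List Int) (i j : Nat) : rEq seq i j → rEq seq j i := by
  intro h k hk; rw [h k hk]

theorem rLt_trans (seq : List Int) (isMin : Bool) (i j l : Nat) :
    rLt seq isMin i j → rLt seq isMin j l → rLt seq isMin i l := by
  rintro ⟨k1, hk1, hp1, hl1⟩ ⟨k2, hk2, hp2, hl2⟩
  refine ⟨min k1 k2, lt_of_le_of_lt (min_le_left _ _) hk1, ?_, ?_⟩
  · intro m hm
    rw [hp1 m (lt_of_lt_of_le hm (min_le_left _ _)), hp2 m (lt_of_lt_of_le hm (min_le_right _ _))]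
  · rcases lt_trichotomy k1 k2 with h | h | h
    · rw [min_eq_left h.le, ← hp2 k1 h]; exact hl1
    · subst h; rw [min_self]; exact LTi_trans isMin _ _ _ hl1 hl2
    · rw [min_eq_right h.le, hp1 k2 h]; exact hl2

theorem rLe_trans (seq : List Int) (isMin : Bool) (i j l : Nat) :
    rLe seq isMin i j → rLe seq isMin j l → rLe seq isMin i l := by
  rintro (h1 | h1) (h2 | h2)
  · exact Or.inl (rLt_trans seq isMin i j l h1 h2)
  · exact Or.inl (rLt_rEq_trans seq isMin i j l h1 h2)
  · exact Or.inl (rEq_rLt_trans seq isMin i j l h1 h2)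
  · exact Or.inr (rEq_trans seq i j l h1 h2)

theorem rLe_total (seq : List Int) (isMin : Bool) (i j : Nat) :
    rLe seq isMin i j ∨ rLt seq isMin j i := by
  classical
  by_cases heq : rEq seq i j
  · exact Or.inl (Or.inr heq)
  · have hex : ∃ k, k < seq.length ∧ fI seq (i + k) ≠ fI seq (j + k) := by
      by_contra hno
      exact heq fun k hk => by
        by_contra hne
        exact hno ⟨k, hk, hne⟩
    set k0 := Nat.find hex with hk0
    obtain ⟨hk0n, hk0ne⟩ := Nat.find_spec hex
    have hpre : ∀ m, m < k0 → fI seq (i + m) = fI seq (j + m) := by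
      intro m hm
      by_contra hc
      exact Nat.find_min hex hm ⟨hm.trans hk0n, hc⟩
    rcases LTi_total isMin _ _ hk0ne with h | h
    · exact Or.inl (Or.inl ⟨k0, hk0n, hpre, h⟩)
    · exact Or.inr ⟨k0, hk0n, fun m hm => (hpre m hm).symm, h⟩

theorem best_exists (seq : List Int) (isMin : Bool) (hn : 0 < seq.length) :
    ∃ j, Best seq isMin j := by
  have aux : ∀ K, K ≤ seq.length → 0 < K → ∃ j, j < K ∧ ∀ k, k < K → rLe seq isMin j k := by
    intro K
    induction K with
    | zero => omega
    | succ K ih =>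
      intro hle hpos
      by_cases hK : K = 0
      · subst hK
        exact ⟨0, by omega, fun k hk => by interval_cases k; exact rLe_refl seq isMin 0⟩
      · obtain ⟨j, hj, hall⟩ := ih (by omega) (by omega)
        rcases rLe_total seq isMin j K with h | h
        · refine ⟨j, by omega, fun k hk => ?_⟩
          rcases Nat.lt_succ_iff_lt_or_eq.mp hk with hk' | rfl
          · exact hall k hk'
          · exact h
        · refine ⟨K, by omega, fun k hk => ?_⟩
          rcases Nat.lt_succ_iff_lt_or_eq.mp hk with hk' | rfl
          · exact rLe_trans seq isMin _ j k (Or.inl h) (hall k hk')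
          · exact rLe_refl seq isMin _
  obtain ⟨j, hj, hall⟩ := aux seq.length le_rfl hn
  exact ⟨j, hj, hall⟩


theorem pvCompare_eq_zero_iff (isMin : Bool) (a b : Int) : pvCompare isMin a b = 0 ↔ a = b := by
  cases isMin <;> unfold pvCompare <;> split_ifs <;> simp_all

theorem pvCompare_pos (isMin : Bool) (a b : Int) (h0 : ¬ pvCompare isMin a b = 0)
    (hp : 0 < pvCompare isMin a b) : LTi isMin b a := by
  cases isMin <;> unfold pvCompare at * <;> unfold LTi <;> split_ifs at * <;> simp_all

theorem pvCompare_neg (isMin : Bool) (a b : Int) (h0 : ¬ pvCompare isMin a b = 0)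
    (hp : ¬ 0 < pvCompare isMin a b) : LTi isMin a b := by
  cases isMin <;> unfold pvCompare at * <;> unfold LTi <;> split_ifs at * <;> simp_all <;> omega

-- when the scan sees a strict difference after a matched prefix, none of the
-- loser's skipped starts l, l+1, …, l+same can be the least optimal start m
theorem beat (seq : List Int) (isMin : Bool) (m : Nat) (hm : Best seq isMin m)
    (w l same : Nat) (hsame : same < seq.length)
    (hpre : ∀ k, k < same → fI seq (l + k) = fI seq (w + k))
    (hs : LTi isMin (fI seq (w + same)) (fI seq (l + same))) :
    ∀ t, t ≤ same → m ≠ l + t := by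
  intro t ht hmeq
  have hn : 0 < seq.length := by omega
  have hlt : rLt seq isMin (w + t) (l + t) := by
    refine ⟨same - t, by omega, ?_, ?_⟩
    · intro mm hmm
      have h1 : w + t + mm = w + (t + mm) := by omega
      have h2 : l + t + mm = l + (t + mm) := by omega
      rw [h1, h2]
      exact (hpre (t + mm) (by omega)).symm
    · have h1 : w + t + (same - t) = w + same := by omega
      have h2 : l + t + (same - t) = l + same := by omega
      rw [h1, h2]
      exact hs
  have hle : rLe seq isMin m ((w + t) % seq.length) := hm.2 _ (Nat.mod_lt _ hn)
  rw [rLe_mod_right] at hle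
  rw [hmeq] at hle
  exact rLe_rLt_absurd seq isMin _ _ hle hlt

-- rEq transported optimality
theorem best_congr (seq : List Int) (isMin : Bool) (m i : Nat) (hm : Best seq isMin m)
    (hi : i < seq.length) (he : rEq seq i m) : Best seq isMin i :=
  ⟨hi, fun k hk => rLe_trans seq isMin i m k (Or.inr he) (hm.2 k hk)⟩

-- at loop exit, min i1 i2 is an optimal start
theorem exit_best (seq : List Int) (isMin : Bool) (m : Nat)
    (hm : Best seq isMin m) (hleast : ∀ j, j < m → ¬ Best seq isMin j)
    (i1 i2 same : Nat) (hinv : InvA seq isMin m i1 i2 same)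
    (hstop : ¬ (i1 < seq.length ∧ i2 < seq.length ∧ same < seq.length)) :
    Best seq isMin (min i1 i2) := by
  obtain ⟨hne, hor, hpre, halive⟩ := hinv
  have hmn : m < seq.length := hm.1
  by_cases h1 : i1 < seq.length
  · by_cases h2 : i2 < seq.length
    · -- full prefix matched: same ≥ n
      have hsame : seq.length ≤ same := by omega
      have hpren : rEq seq i1 i2 := fun k hk => hpre k (by omega)
      have hm12 : m = i1 ∨ m = i2 := by
        rcases halive with h | h | h
        · exact Or.inl h
        · exact Or.inr h
        · exfalso
          -- m beyond both pointers is impossible: the word is (max−min)-periodic,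
          -- so m − (max−min) would be an optimal start smaller than m
          set mn := min i1 i2 with hmndef
          set mx := max i1 i2 with hmxdef
          have hd : 0 < mx - mn := by
            rcases Nat.lt_or_ge i1 i2 with hlt | hge
            · simp only [hmndef, hmxdef]; omega
            · simp only [hmndef, hmxdef]; omega
          set d := mx - mn with hddef
          have hpmn : ∀ k, k < seq.length → fI seq (mn + k) = fI seq (mn + d + k) := by
            intro k hk
            have hmd : mn + d = mx := by omega
            rcases le_total i1 i2 with hle12 | hle12
            · have e1 : mn = i1 := by omega
              have e2 : mx = i2 := by omega
              rw [hmd, e1, e2]; exact hpren k hk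
            · have e1 : mn = i2 := by omega
              have e2 : mx = i1 := by omega
              rw [hmd, e1, e2]; exact (hpren k hk).symm
          have hper : ∀ x, mn ≤ x → fI seq x = fI seq (x + d) := by
            intro x hx
            have hxe : x = mn + (x - mn) := by omega
            set t := x - mn with htdef
            have e1 : fI seq (mn + t) = fI seq (mn + t % seq.length) :=
              fI_congr seq _ _ (Nat.ModEq.add_left mn (Nat.mod_modEq t seq.length)).symm
            have e2 : fI seq (mn + t % seq.length) = fI seq (mn + d + t % seq.length) :=
              hpmn _ (Nat.mod_lt _ (by omega))
            have e3 : fI seq (mn + d + t % seq.length) = fI seq (mn + d + t) :=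
              fI_congr seq _ _ (Nat.ModEq.add_left (mn + d) (Nat.mod_modEq t seq.length))
            rw [hxe, e1, e2, e3]
            congr 1
            omega
          have hmx : mx < m := h
          have hdm : d ≤ mx := by omega
          have heq : rEq seq (m - d) m := by
            intro k hk
            have hge : mn ≤ m - d + k := by omega
            have := hper (m - d + k) hge
            have e : m - d + k + d = m + k := by omega
            rw [e] at this
            exact this
          exact hleast (m - d) (by omega) (best_congr seq isMin m (m - d) hm (by omega) heq)
      have hb1 : Best seq isMin i1 := by
        rcases hm12 with h | h
        · rwa [← h]
        · exact best_congr seq isMin m i1 hm h1 (h ▸ hpren)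
      have hb2 : Best seq isMin i2 := by
        rcases hm12 with h | h
        · exact best_congr seq isMin m i2 hm h2 (h ▸ rEq_symm seq i1 i2 hpren)
        · rwa [← h]
      rcases le_total i1 i2 with h | h
      · rwa [min_eq_left h]
      · rwa [min_eq_right h]
    · -- i2 ran off the end: m must be i1
      have hmi : m = i1 := by
        rcases halive with h | h | h
        · exact h
        · omega
        · exfalso; omega
      have : min i1 i2 = i1 := min_eq_left (by omega)
      rw [this, ← hmi]; exact hm
  · -- i1 ran off the end: m must be i2
    have h2 : i2 < seq.length := by tauto
    have hmi : m = i2 := by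
      rcases halive with h | h | h
      · omega
      · exact h
      · exfalso; omega
    have : min i1 i2 = i2 := min_eq_right (by omega)
    rw [this, ← hmi]; exact hm


-- started with enough fuel and a valid invariant, the scan's final pointers
-- have an optimal start as their minimum
theorem pvLoop_inv (seq : List Int) (isMin : Bool) (m : Nat)
    (hm : Best seq isMin m) (hleast : ∀ j, j < m → ¬ Best seq isMin j) :
    ∀ fuel i1 i2 same, InvA seq isMin m i1 i2 same →
      3 * seq.length ≤ fuel + i1 + i2 + same →
      Best seq isMin (min (pvLoop seq isMin seq.length fuel i1 i2 same).1
                          (pvLoop seq isMin seq.length fuel i1 i2 same).2) := by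
  intro fuel
  induction fuel with
  | zero =>
    intro i1 i2 same hinv hbud
    have hstop : ¬ (i1 < seq.length ∧ i2 < seq.length ∧ same < seq.length) := by omega
    simpa [pvLoop] using exit_best seq isMin m hm hleast i1 i2 same hinv hstop
  | succ fuel ih =>
    intro i1 i2 same hinv hbud
    by_cases hg : i1 < seq.length ∧ i2 < seq.length ∧ same < seq.length
    · have e1 : PySem.List.pyGetD seq ((((i1 + same) % seq.length : Nat)) : Int) 0
          = fI seq (i1 + same) := by rw [PySem.List.pyGetD_natCast]; rfl
      have e2 : PySem.List.pyGetD seq ((((i2 + same) % seq.length : Nat)) : Int) 0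
          = fI seq (i2 + same) := by rw [PySem.List.pyGetD_natCast]; rfl
      obtain ⟨hne, hor, hpre, halive⟩ := hinv
      by_cases h0 : pvCompare isMin (fI seq (i1 + same)) (fI seq (i2 + same)) = 0
      · have hstep : pvLoop seq isMin seq.length (fuel+1) i1 i2 same =
            pvLoop seq isMin seq.length fuel i1 i2 (same+1) := by
          simp only [pvLoop, if_pos hg, e1, e2, if_pos h0]
        rw [hstep]
        apply ih
        · refine ⟨hne, hor, ?_, halive⟩
          intro k hk
          rcases Nat.lt_succ_iff_lt_or_eq.mp hk with hk' | hk'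
          · exact hpre k hk'
          · subst hk'; exact (pvCompare_eq_zero_iff isMin _ _).mp h0
        · omega
      · by_cases hp : pvCompare isMin (fI seq (i1 + same)) (fI seq (i2 + same)) > 0
        · -- i1 loses; it jumps to i1+same+1
          have hlt : LTi isMin (fI seq (i2 + same)) (fI seq (i1 + same)) :=
            pvCompare_pos isMin _ _ h0 hp
          have hbt : ∀ t, t ≤ same → m ≠ i1 + t :=
            beat seq isMin m hm i2 i1 same hg.2.2 hpre hlt
          have hgt : max i1 i2 < m → i1 + same < m := by
            intro hmx
            by_contra hc
            exact hbt (m - i1) (by omega) (by omega)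
          by_cases hb : i1 + same + 1 = i2
          · have hstep : pvLoop seq isMin seq.length (fuel+1) i1 i2 same =
                pvLoop seq isMin seq.length fuel (i1+same+1) (i2+1) 0 := by
              simp only [pvLoop, if_pos hg, e1, e2, if_neg h0, if_pos hp]
              simp [hb]
            rw [hstep]
            apply ih
            · refine ⟨by omega, by omega, by omega, ?_⟩
              rcases halive with h | h | h
              · exact absurd h (by have := hbt 0 (by omega); omega)
              · omega
              · have := hgt h; omega
            · omega
          · have hstep : pvLoop seq isMin seq.length (fuel+1) i1 i2 same =
                pvLoop seq isMin seq.length fuel (i1+same+1) i2 0 := by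
              simp only [pvLoop, if_pos hg, e1, e2, if_neg h0, if_pos hp]
              simp [hb]
            rw [hstep]
            apply ih
            · refine ⟨hb, by omega, by omega, ?_⟩
              rcases halive with h | h | h
              · exact absurd h (by have := hbt 0 (by omega); omega)
              · omega
              · have := hgt h; omega
            · omega
        · -- i2 loses; it jumps to i2+same+1
          have hlt : LTi isMin (fI seq (i1 + same)) (fI seq (i2 + same)) :=
            pvCompare_neg isMin _ _ h0 hp
          have hbt : ∀ t, t ≤ same → m ≠ i2 + t :=
            beat seq isMin m hm i1 i2 same hg.2.2 (fun k hk => (hpre k hk).symm) hlt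
          have hgt : max i1 i2 < m → i2 + same < m := by
            intro hmx
            by_contra hc
            exact hbt (m - i2) (by omega) (by omega)
          by_cases hb : i1 = i2 + same + 1
          · have hstep : pvLoop seq isMin seq.length (fuel+1) i1 i2 same =
                pvLoop seq isMin seq.length fuel i1 (i2+same+2) 0 := by
              simp only [pvLoop, if_pos hg, e1, e2, if_neg h0, if_neg hp]
              simp [hb]
            rw [hstep]
            apply ih
            · refine ⟨by omega, by omega, by omega, ?_⟩
              rcases halive with h | h | h
              · omega
              · exact absurd h (by have := hbt 0 (by omega); omega)
              · have := hgt h; omega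
            · omega
          · have hstep : pvLoop seq isMin seq.length (fuel+1) i1 i2 same =
                pvLoop seq isMin seq.length fuel i1 (i2+same+1) 0 := by
              simp only [pvLoop, if_pos hg, e1, e2, if_neg h0, if_neg hp]
              simp [hb]
            rw [hstep]
            apply ih
            · refine ⟨by omega, by omega, by omega, ?_⟩
              rcases halive with h | h | h
              · omega
              · exact absurd h (by have := hbt 0 (by omega); omega)
              · have := hgt h; omega
            · omega
    · have hstep : pvLoop seq isMin seq.length (fuel+1) i1 i2 same = (i1, i2) := by
        simp only [pvLoop, if_neg hg]
      rw [hstep]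
      exact exit_best seq isMin m hm hleast i1 i2 same ⟨hinv.1, hinv.2.1, hinv.2.2.1, hinv.2.2.2⟩ hg


theorem rotN_length (seq : List Int) (i : Nat) : (rotN seq i).length = seq.length := by
  simp [rotN]; omega

theorem rotN_getD (seq : List Int) (i k : Nat) (hi : i < seq.length) (hk : k < seq.length) :
    (rotN seq i).getD k 0 = fI seq (i + k) := by
  unfold rotN fI
  by_cases h : k < seq.length - i
  · rw [List.getD_eq_getElem?_getD, List.getElem?_append_left (by simp; omega),
      List.getElem?_drop, List.getD_eq_getElem?_getD, Nat.mod_eq_of_lt (by omega)]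
  · rw [List.getD_eq_getElem?_getD, List.getElem?_append_right (by simp; omega),
      List.getD_eq_getElem?_getD]
    have hidx : (i + k) % seq.length = k - (seq.drop i).length := by
      rw [Nat.mod_eq_sub_mod (by omega), Nat.mod_eq_of_lt (by omega)]
      simp
      omega
    rw [hidx, List.getElem?_take_of_lt (by simp; omega)]

theorem rEq_rotN_eq (seq : List Int) (i j : Nat) (hi : i < seq.length) (hj : j < seq.length)
    (h : rEq seq i j) : rotN seq i = rotN seq j := by
  apply List.ext_getElem (by rw [rotN_length, rotN_length])
  intro k h1 h2
  have hk : k < seq.length := by rwa [rotN_length] at h1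
  have hh := h k hk
  rw [← rotN_getD seq i k hi hk, ← rotN_getD seq j k hj hk] at hh
  rwa [List.getD_eq_getElem _ 0 h1, List.getD_eq_getElem _ 0 h2] at hh

-- prefix equal, first difference strictly smaller ⇒ lexicographically smaller
theorem lt_of_first_diff : ∀ (x y : List Int), x.length = y.length →
    ∀ k, k < x.length → (∀ m, m < k → x.getD m 0 = y.getD m 0) →
    x.getD k 0 < y.getD k 0 → x < y := by
  intro x
  induction x with
  | nil =>
    intro y _ k hk _ _
    simp at hk
  | cons a x ihx =>
    intro y hlen k hk hpre hlt
    cases y with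
    | nil => simp at hlen
    | cons b y =>
      rw [List.cons_lt_cons_iff]
      rcases Nat.eq_zero_or_pos k with rfl | hk0
      · simp only [List.getD_cons_zero] at hlt
        exact Or.inl hlt
      · have hab : a = b := by simpa using hpre 0 hk0
        refine Or.inr ⟨hab, ihx y (by simpa using hlen) (k - 1) (by simp at hk; omega) ?_ ?_⟩
        · intro mm hmm
          simpa using hpre (mm + 1) (by omega)
        · have hke : k = (k - 1) + 1 := by omega
          rw [hke] at hlt
          simpa using hlt

theorem rLt_rot_lt_min (seq : List Int) (i j : Nat) (hi : i < seq.length) (hj : j < seq.length)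
    (h : rLt seq true i j) : rotN seq i < rotN seq j := by
  obtain ⟨k, hk, hp, hl⟩ := h
  refine lt_of_first_diff (rotN seq i) (rotN seq j) (by rw [rotN_length, rotN_length])
    k (by rwa [rotN_length]) ?_ ?_
  · intro mm hmm
    rw [rotN_getD seq i mm hi (by omega), rotN_getD seq j mm hj (by omega)]
    exact hp mm hmm
  · rw [rotN_getD seq i k hi hk, rotN_getD seq j k hj hk]
    simpa [LTi] using hl

theorem rLt_rot_lt_max (seq : List Int) (i j : Nat) (hi : i < seq.length) (hj : j < seq.length)
    (h : rLt seq false i j) : rotN seq j < rotN seq i := by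
  obtain ⟨k, hk, hp, hl⟩ := h
  refine lt_of_first_diff (rotN seq j) (rotN seq i) (by rw [rotN_length, rotN_length])
    k (by rwa [rotN_length]) ?_ ?_
  · intro mm hmm
    rw [rotN_getD seq i mm hi (by omega), rotN_getD seq j mm hj (by omega)]
    exact (hp mm hmm).symm
  · rw [rotN_getD seq i k hi hk, rotN_getD seq j k hj hk]
    simpa [LTi] using hl

theorem rots_eq (seq : List Int) :
    (PySem.List.pyRange 0 (PySem.List.len seq) 1).map
      (fun i => PySem.List.slice seq (some i) none ++ PySem.List.slice seq none (some i)) =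
    (List.range seq.length).map (rotN seq) := by
  rw [PySem.List.len_eq, PySem.List.pyRange_one]
  simp [List.map_map, Function.comp_def, PySem.List.slice_from_natCast,
    PySem.List.slice_to_natCast, rotN]

-- ===== VERDICT (by name: the statement is the Claim_ definition above) =====
theorem findIsomorphic_spec : Claim_equal_findIsomorphic := by
  unfold Claim_equal_findIsomorphic Spec_findIsomorphic
  intro seq isMin _
  by_cases hlen : seq.length ≤ 1
  · unfold findIsomorphic findIsomorphic_alt
    rw [if_pos hlen, if_pos hlen]
  · classical
    obtain hex := best_exists seq isMin (by omega)
    set m := Nat.find hex with hmdef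
    have hm : Best seq isMin m := Nat.find_spec hex
    have hleast : ∀ j, j < m → ¬ Best seq isMin j := fun j hj => Nat.find_min hex hj
    have hres := pvLoop_inv seq isMin m hm hleast (3 * seq.length + 1) 0 1 0
      ⟨by omega, Or.inl (by omega), fun k hk => absurd hk (Nat.not_lt_zero k), by omega⟩
      (by omega)
    set r := pvLoop seq isMin seq.length (3 * seq.length + 1) 0 1 0 with hrdef
    set res := min r.1 r.2 with hresdef
    have hresn : res < seq.length := hres.1
    have hA : findIsomorphic seq isMin = rotN seq res := by
      unfold findIsomorphic
      rw [if_neg hlen]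
      simp only [PySem.List.slice_from_natCast, PySem.List.slice_to_natCast, rotN]
      rfl
    rw [hA]
    unfold findIsomorphic_alt
    rw [if_neg hlen]
    simp only [rots_eq seq]
    cases isMin
    · cases hv : PySem.List.max? ((List.range seq.length).map (rotN seq)) (fun r => r) with
      | none =>
        exfalso
        have h0 := (PySem.List.max?_eq_none_iff _ _).mp hv
        have h1 := congrArg List.length h0
        simp at h1
        rw [h1] at hlen
        simp at hlen
      | some v =>
        simp only [Option.getD_some]
        obtain ⟨jv, hjvr, hjveq⟩ := List.mem_map.mp (PySem.List.max?_mem hv)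
        have hjv : jv < seq.length := List.mem_range.mp hjvr
        have hv2 : @PySem.List.max? (List ℤ) (List ℤ) List.instLT LinearOrder.toDecidableLT
            ((List.range seq.length).map (rotN seq)) (fun r => r) = some v := by
          have he : (LinearOrder.toDecidableLT : DecidableLT (List ℤ)) =
              (fun a b => (a.decidableLT b)) := Subsingleton.elim _ _
          rw [he]; exact hv
        have h1 : rotN seq res ≤ v := by
          have := PySem.List.max?_isMax hv2 (rotN seq res)
            (List.mem_map_of_mem (List.mem_range.mpr hresn))
          simpa using this
        have h2 : v ≤ rotN seq res := by
          rcases hres.2 jv hjv with hlt | heq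
          · rw [← hjveq]
            exact le_of_lt (rLt_rot_lt_max seq res jv hresn hjv hlt)
          · rw [← hjveq, ← rEq_rotN_eq seq res jv hresn hjv heq]
        exact le_antisymm h1 h2
    · cases hv : PySem.List.min? ((List.range seq.length).map (rotN seq)) (fun r => r) with
      | none =>
        exfalso
        have h0 := (PySem.List.min?_eq_none_iff _ _).mp hv
        have h1 := congrArg List.length h0
        simp at h1
        rw [h1] at hlen
        simp at hlen
      | some v =>
        simp only [Option.getD_some]
        obtain ⟨jv, hjvr, hjveq⟩ := List.mem_map.mp (PySem.List.min?_mem hv)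
        have hjv : jv < seq.length := List.mem_range.mp hjvr
        have hv2 : @PySem.List.min? (List ℤ) (List ℤ) List.instLT LinearOrder.toDecidableLT
            ((List.range seq.length).map (rotN seq)) (fun r => r) = some v := by
          have he : (LinearOrder.toDecidableLT : DecidableLT (List ℤ)) =
              (fun a b => (a.decidableLT b)) := Subsingleton.elim _ _
          rw [he]; exact hv
        have h1 : v ≤ rotN seq res := by
          have := PySem.List.min?_isMin hv2 (rotN seq res)
            (List.mem_map_of_mem (List.mem_range.mpr hresn))
          simpa using this
        have h2 : rotN seq res ≤ v := by
          rcases hres.2 jv hjv with hlt | heq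
          · rw [← hjveq]
            exact le_of_lt (rLt_rot_lt_min seq res jv hresn hjv hlt)
          · rw [← hjveq, rEq_rotN_eq seq res jv hresn hjv heq]
        exact le_antisymm h2 h1
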